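-- pv_equiv track=rewrite | github.com/cytopia/pwncat | pse/asym-enc/pse-asym_enc-client_send.py | transform
-- ===== SOURCE A (Python) =====
-- def transform(data):
--     """The transformer function."""
--     __PSE_ASYM_ENC_CLIENT_SEND_SHIFT = 14
--
--     output = []
--     for c in data:
--         num = ord(c) + __PSE_ASYM_ENC_CLIENT_SEND_SHIFT
--         while num > 127:
--             num -= 127
--         output.append(chr(num))
--     return "".join(output)
-- ===== SOURCE B (Python) =====
-- def transform(data):
--     """The transformer function."""
--     table = {ord(c): ((ord(c) + 13) % 127) + 1 for c in set(data)}
--     return data.translate(table)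
-- ===== Notes on version B (the rewrite author's own statement) =====
-- stated objective: faster
-- what changed: Replaces the per-character append loop with repeated subtraction by a translation table built once over the distinct characters (closed-form ((ord+13)%127)+1) applied via str.translate in a single C-level pass.
import Mathlib
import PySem

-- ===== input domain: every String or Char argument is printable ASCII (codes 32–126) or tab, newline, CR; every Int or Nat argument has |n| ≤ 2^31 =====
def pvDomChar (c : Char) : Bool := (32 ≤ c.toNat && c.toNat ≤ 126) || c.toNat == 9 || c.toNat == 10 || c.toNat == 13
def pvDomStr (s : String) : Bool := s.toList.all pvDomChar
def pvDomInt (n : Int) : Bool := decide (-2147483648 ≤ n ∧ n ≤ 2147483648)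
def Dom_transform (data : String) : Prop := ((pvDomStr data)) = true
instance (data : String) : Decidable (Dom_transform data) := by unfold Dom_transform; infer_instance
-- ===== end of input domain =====

-- B replaces A's per-character while-subtraction loop with a translation table built once
-- over the distinct characters and applied in one pass (idiomatic str.translate).

-- ===== PORT A =====
-- the 'while num > 127: num -= 127' loop of A
def pvReduce (n : Nat) : Nat :=
  if 127 < n then pvReduce (n - 127) else n

def transform (data : String) : String :=
  String.ofList
    (data.toList.foldl (fun out c => out ++ [Char.ofNat (pvReduce (c.toNat + 14))]) [])

-- ===== PORT B =====
-- table = {ord(c): ((ord(c)+13) % 127) + 1 for c in set(data)}; data.translate(table)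
def transform_alt (data : String) : String :=
  let table : PySem.Dict Int Int :=
    (PySem.Set.ofList data.toList).foldl
      (fun d c => d.insert ((c.toNat : Int)) (PySem.Int.mod ((c.toNat : Int) + 13) 127 + 1))
      PySem.Dict.empty
  String.ofList (data.toList.map (fun c =>
    match table.get? ((c.toNat : Int)) with
    | some v => Char.ofNat v.toNat
    | none => c))

-- ===== PRECONDITION & SPEC =====
def Spec_transform (data : String) (out : String) : Prop := out = transform_alt data
instance (data : String) (out : String) : Decidable (Spec_transform data out) := by unfold Spec_transform; infer_instance

-- ===== CLAIM (what is proved, stated in full; the proofs are below) =====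
def Claim_equal_transform : Prop := ∀ (data : String), Dom_transform data → Spec_transform data (transform data)

-- ===== LEMMAS AND PROOFS =====

-- looking up a character that occurs in the list the table was folded from yields its table value
theorem pvLookup_fold (l : List Char) (d : PySem.Dict Int Int) (c : Char) :
    (l.foldl (fun d x => d.insert ((x.toNat : Int)) (PySem.Int.mod ((x.toNat : Int) + 13) 127 + 1)) d).get? ((c.toNat : Int)) =
      if c ∈ l then some (PySem.Int.mod ((c.toNat : Int) + 13) 127 + 1) else d.get? ((c.toNat : Int)) := by
  induction l generalizing d with
  | nil => simp
  | cons x l ih =>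
    simp only [List.foldl_cons, ih, List.mem_cons]
    by_cases hcl : c ∈ l
    · simp [hcl]
    · by_cases hcx : c = x
      · subst hcx
        simp [hcl, PySem.Dict.get?_insert_self]
      · have hne : (c.toNat : Int) ≠ (x.toNat : Int) := by
          intro h
          have hn : c.toNat = x.toNat := by exact_mod_cast h
          exact hcx (Char.ext (by
            have : c.val.toNat = x.val.toNat := hn
            exact UInt32.toNat_inj.mp this))
        rw [PySem.Dict.get?_insert]
        simp [hcl, hcx, hne]

-- pointwise: A's while loop agrees with B's closed form on domain codes
theorem pvReduce_eq (n : Nat) (h : n ≤ 126) :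
    pvReduce (n + 14) = (PySem.Int.mod ((n : Int) + 13) 127 + 1).toNat := by
  rw [PySem.Int.mod_eq_emod_of_pos (by norm_num)]
  unfold pvReduce
  split_ifs with h1
  · unfold pvReduce
    split_ifs with h2
    · omega
    · omega
  · omega

-- ===== VERDICT (by name: the statement is the Claim_ definition above) =====
theorem transform_spec : Claim_equal_transform := by
  intro data hdom
  unfold Spec_transform transform transform_alt
  rw [PySem.List.foldl_append_singleton_eq_map]
  congr 1
  apply List.map_congr_left
  intro c hc
  rw [pvLookup_fold]
  rw [if_pos (by simpa using (PySem.Set.mem_ofList _ _).2 hc)]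
  have hdc : pvDomChar c = true := by
    have := (List.all_eq_true.1 hdom) c hc
    simpa using this
  have hle : c.toNat ≤ 126 := by
    simp only [pvDomChar, Bool.or_eq_true, Bool.and_eq_true, decide_eq_true_eq, beq_iff_eq] at hdc
    omega
  simp [pvReduce_eq c.toNat hle]
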